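-- pv_equiv track=rewrite | github.com/Niluffar/blocks_custom_programs | utils/plan_validator.py | _validate_weekly_frequency
-- ===== SOURCE A (Python) =====
-- from typing import List, Dict, Tuple, Any
--
-- def _validate_weekly_frequency(
--
--     plan: List[Dict],
--     target_frequency: int,
--     weekly_schedule: List[int] = None
-- ) -> List[str]:
--     """Проверка частоты тренировок по неделям (с поддержкой волнообразной периодизации)."""
--     errors = []
--
--     for week in range(1, 9):
--         week_workouts = [w for w in plan if w.get('week') == week]
--         actual_frequency = len(week_workouts)
--
--         # Ожидаемая частота: из weekly_schedule если есть, иначе единая target_frequency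
--         if weekly_schedule and len(weekly_schedule) >= week:
--             expected = weekly_schedule[week - 1]
--         else:
--             expected = target_frequency
--
--         if actual_frequency != expected:
--             errors.append(
--                 f"Неделя {week}: неверная частота {actual_frequency} "
--                 f"(ожидается {expected})"
--             )
--
--     return errors
-- ===== SOURCE B (Python) =====
-- def _validate_weekly_frequency(plan, target_frequency, weekly_schedule=None):
--     # Bucket-array counting pass, staged expected-frequency table, comprehension output.
--     buckets = [0] * 8
--     for w in plan:
--         k = w.get('week')
--         if k in range(1, 9):
--             buckets[k - 1] += 1
--     if weekly_schedule:
--         expecteds = (list(weekly_schedule[:8]) + [target_frequency] * 8)[:8]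
--     else:
--         expecteds = [target_frequency] * 8
--     return [
--         f"Неделя {i + 1}: неверная частота {actual} (ожидается {expected})"
--         for i, (actual, expected) in enumerate(zip(buckets, expecteds))
--         if actual != expected
--     ]
-- ===== Notes on version B (the rewrite author's own statement) =====
-- stated objective: alternative
-- what changed: Replaces the eight per-week filter scans with a bucket-array counting pass over the plan, a separately staged expected-frequency table built by list slicing/padding instead of a per-week conditional, and a single comprehension over enumerate(zip(buckets, expecteds)) that emits the errors.
import Mathlib
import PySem

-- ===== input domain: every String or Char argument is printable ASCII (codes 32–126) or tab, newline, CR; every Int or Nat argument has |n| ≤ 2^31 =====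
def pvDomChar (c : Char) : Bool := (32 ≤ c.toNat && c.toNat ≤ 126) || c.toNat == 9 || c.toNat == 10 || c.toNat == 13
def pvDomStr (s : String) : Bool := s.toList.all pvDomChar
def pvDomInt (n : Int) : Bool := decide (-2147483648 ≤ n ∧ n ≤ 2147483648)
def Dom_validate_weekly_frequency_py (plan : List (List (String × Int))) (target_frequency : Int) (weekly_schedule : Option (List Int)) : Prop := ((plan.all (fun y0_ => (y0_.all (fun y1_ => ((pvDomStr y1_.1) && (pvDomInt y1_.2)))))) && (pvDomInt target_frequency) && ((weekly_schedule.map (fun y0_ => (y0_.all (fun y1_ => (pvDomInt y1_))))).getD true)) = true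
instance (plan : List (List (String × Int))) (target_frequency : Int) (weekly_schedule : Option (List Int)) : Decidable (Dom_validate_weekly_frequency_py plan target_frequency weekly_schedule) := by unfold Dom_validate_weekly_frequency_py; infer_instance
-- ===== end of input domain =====

-- B replaces A's eight per-week filter scans with a bucket-array counting pass, a staged expected table built by slicing/padding, and one comprehension over enumerate(zip(...)); return value proved equal.


-- ===== PORT A =====
-- w.get('week') on the association-list representation of a dict: first match (exact: dict keys are unique)
def pvGetWeek (w : List (String × Int)) : Option Int :=
  (w.find? (fun p => p.1 == "week")).map (fun p => p.2)

-- the shared f-string (identical in both Pythons)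
def pvMsg (week actual expected : Int) : String :=
  "Неделя " ++ PySem.Int.toStr week ++ ": неверная частота " ++ PySem.Int.toStr actual ++
    " (ожидается " ++ PySem.Int.toStr expected ++ ")"

-- expected frequency in A: weekly_schedule[week-1] if the (truthy) schedule covers the week, else target_frequency
-- (pyGetD is exact here: the guard len(ws) >= week >= 1 keeps the index in range)
def pvExpected (target_frequency : Int) (weekly_schedule : Option (List Int)) (week : Int) : Int :=
  match weekly_schedule with
  | some ws => if ws ≠ [] ∧ week ≤ (ws.length : Int) then PySem.List.pyGetD ws (week - 1) 0
               else target_frequency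
  | none => target_frequency

def validate_weekly_frequency_py (plan : List (List (String × Int))) (target_frequency : Int) (weekly_schedule : Option (List Int)) : List String :=
  (PySem.List.pyRange 1 9 1).foldl (fun errors week =>
    let week_workouts := plan.filter (fun w => pvGetWeek w == some week)
    let actual_frequency : Int := week_workouts.length
    let expected := pvExpected target_frequency weekly_schedule week
    if actual_frequency ≠ expected then errors ++ [pvMsg week actual_frequency expected]
    else errors) []

-- ===== PORT B =====
-- "if k in range(1,9): buckets[k-1] += 1"; the read/write index k-1 is then in range 0..7, so List.set/getD are exact
def pvBump (b : List Int) (k : Option Int) : List Int :=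
  match k with
  | some v => if 1 ≤ v ∧ v ≤ 8 then b.set (v - 1).toNat (b.getD (v - 1).toNat 0 + 1) else b
  | none => b

-- "(list(weekly_schedule[:8]) + [target_frequency]*8)[:8]" when the schedule is truthy, else "[target_frequency]*8"
def pvExpectedTable (target_frequency : Int) (weekly_schedule : Option (List Int)) : List Int :=
  match weekly_schedule with
  | some ws => if ws ≠ [] then
                 PySem.List.slice (PySem.List.slice ws none (some 8) ++ List.replicate 8 target_frequency) none (some 8)
               else List.replicate 8 target_frequency
  | none => List.replicate 8 target_frequency

def validate_weekly_frequency_py_alt (plan : List (List (String × Int))) (target_frequency : Int) (weekly_schedule : Option (List Int)) : List String :=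
  let buckets := plan.foldl (fun b w => pvBump b (pvGetWeek w)) (List.replicate 8 (0 : Int))
  let expecteds := pvExpectedTable target_frequency weekly_schedule
  ((PySem.List.enumerate (buckets.zip expecteds) 0).filter
      (fun p => decide (p.2.1 ≠ p.2.2))).map
    (fun p => pvMsg (p.1 + 1) p.2.1 p.2.2)

-- ===== PRECONDITION & SPEC =====
def Spec_validate_weekly_frequency_py (plan : List (List (String × Int))) (target_frequency : Int) (weekly_schedule : Option (List Int)) (out : List String) : Prop := out = validate_weekly_frequency_py_alt plan target_frequency weekly_schedule
instance (plan : List (List (String × Int))) (target_frequency : Int) (weekly_schedule : Option (List Int)) (out : List String) : Decidable (Spec_validate_weekly_frequency_py plan target_frequency weekly_schedule out) := by unfold Spec_validate_weekly_frequency_py; infer_instance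

-- ===== CLAIM (what is proved, stated in full; the proofs are below) =====
def Claim_equal_validate_weekly_frequency_py : Prop := ∀ (plan : List (List (String × Int))) (target_frequency : Int) (weekly_schedule : Option (List Int)), Dom_validate_weekly_frequency_py plan target_frequency weekly_schedule → Spec_validate_weekly_frequency_py plan target_frequency weekly_schedule (validate_weekly_frequency_py plan target_frequency weekly_schedule)

-- ===== LEMMAS AND PROOFS =====
-- number of workouts of week i
def pvCnt (plan : List (List (String × Int))) (i : Int) : Int :=
  ((plan.filter (fun w => pvGetWeek w == some i)).length : Int)

theorem pv_buckets_go (plan : List (List (String × Int))) (b1 b2 b3 b4 b5 b6 b7 b8 : Int) :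
    plan.foldl (fun b w => pvBump b (pvGetWeek w)) [b1, b2, b3, b4, b5, b6, b7, b8]
      = [b1 + pvCnt plan 1, b2 + pvCnt plan 2, b3 + pvCnt plan 3, b4 + pvCnt plan 4,
         b5 + pvCnt plan 5, b6 + pvCnt plan 6, b7 + pvCnt plan 7, b8 + pvCnt plan 8] := by
  induction plan generalizing b1 b2 b3 b4 b5 b6 b7 b8 with
  | nil => simp [pvCnt]
  | cons a t ih =>
    rcases h : pvGetWeek a with _ | v
    · rw [List.foldl_cons, h, show pvBump [b1, b2, b3, b4, b5, b6, b7, b8] none = [b1, b2, b3, b4, b5, b6, b7, b8] from rfl, ih]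
      simp [pvCnt, h]
    · by_cases hv : 1 ≤ v ∧ v ≤ 8
      · obtain ⟨hv1, hv2⟩ := hv
        interval_cases v
        · rw [List.foldl_cons, h,
            show pvBump [b1, b2, b3, b4, b5, b6, b7, b8] (some 1) = [b1 + 1, b2, b3, b4, b5, b6, b7, b8] from by simp [pvBump], ih]
          simp [pvCnt, h]
          omega
        · rw [List.foldl_cons, h,
            show pvBump [b1, b2, b3, b4, b5, b6, b7, b8] (some 2) = [b1, b2 + 1, b3, b4, b5, b6, b7, b8] from by simp [pvBump], ih]
          simp [pvCnt, h]
          omega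
        · rw [List.foldl_cons, h,
            show pvBump [b1, b2, b3, b4, b5, b6, b7, b8] (some 3) = [b1, b2, b3 + 1, b4, b5, b6, b7, b8] from by simp [pvBump], ih]
          simp [pvCnt, h]
          omega
        · rw [List.foldl_cons, h,
            show pvBump [b1, b2, b3, b4, b5, b6, b7, b8] (some 4) = [b1, b2, b3, b4 + 1, b5, b6, b7, b8] from by simp [pvBump], ih]
          simp [pvCnt, h]
          omega
        · rw [List.foldl_cons, h,
            show pvBump [b1, b2, b3, b4, b5, b6, b7, b8] (some 5) = [b1, b2, b3, b4, b5 + 1, b6, b7, b8] from by simp [pvBump], ih]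
          simp [pvCnt, h]
          omega
        · rw [List.foldl_cons, h,
            show pvBump [b1, b2, b3, b4, b5, b6, b7, b8] (some 6) = [b1, b2, b3, b4, b5, b6 + 1, b7, b8] from by simp [pvBump], ih]
          simp [pvCnt, h]
          omega
        · rw [List.foldl_cons, h,
            show pvBump [b1, b2, b3, b4, b5, b6, b7, b8] (some 7) = [b1, b2, b3, b4, b5, b6, b7 + 1, b8] from by simp [pvBump], ih]
          simp [pvCnt, h]
          omega
        · rw [List.foldl_cons, h,
            show pvBump [b1, b2, b3, b4, b5, b6, b7, b8] (some 8) = [b1, b2, b3, b4, b5, b6, b7, b8 + 1] from by simp [pvBump], ih]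
          simp [pvCnt, h]
          omega
      · rw [List.foldl_cons, h,
          show pvBump [b1, b2, b3, b4, b5, b6, b7, b8] (some v) = [b1, b2, b3, b4, b5, b6, b7, b8] from by simp [pvBump, hv], ih]
        simp [pvCnt, h,
          show v ≠ 1 by omega, show v ≠ 2 by omega, show v ≠ 3 by omega, show v ≠ 4 by omega,
          show v ≠ 5 by omega, show v ≠ 6 by omega, show v ≠ 7 by omega, show v ≠ 8 by omega]

theorem pv_buckets (plan : List (List (String × Int))) :
    plan.foldl (fun b w => pvBump b (pvGetWeek w)) (List.replicate 8 (0 : Int))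
      = [pvCnt plan 1, pvCnt plan 2, pvCnt plan 3, pvCnt plan 4,
         pvCnt plan 5, pvCnt plan 6, pvCnt plan 7, pvCnt plan 8] := by
  have := pv_buckets_go plan 0 0 0 0 0 0 0 0
  simpa [List.replicate] using this

theorem pv_expecteds (target_frequency : Int) (weekly_schedule : Option (List Int)) :
    pvExpectedTable target_frequency weekly_schedule
      = [pvExpected target_frequency weekly_schedule 1, pvExpected target_frequency weekly_schedule 2,
         pvExpected target_frequency weekly_schedule 3, pvExpected target_frequency weekly_schedule 4,
         pvExpected target_frequency weekly_schedule 5, pvExpected target_frequency weekly_schedule 6,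
         pvExpected target_frequency weekly_schedule 7, pvExpected target_frequency weekly_schedule 8] := by
  rcases weekly_schedule with _ | l
  · simp [pvExpectedTable, pvExpected, List.replicate]
  · rcases l with _ | ⟨a1, _ | ⟨a2, _ | ⟨a3, _ | ⟨a4, _ | ⟨a5, _ | ⟨a6, _ | ⟨a7, _ | ⟨a8, rest⟩⟩⟩⟩⟩⟩⟩⟩
    · simp [pvExpectedTable, pvExpected, List.replicate]
    all_goals
      simp only [pvExpectedTable, pvExpected, List.replicate, reduceCtorEq, ne_eq,
        not_false_eq_true, if_true, true_and]
      rw [PySem.List.slice_to _ (by norm_num), PySem.List.slice_to _ (by norm_num)]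
      norm_num [show ((2:Int)).toNat = 2 from rfl, show ((3:Int)).toNat = 3 from rfl, show ((4:Int)).toNat = 4 from rfl, show ((5:Int)).toNat = 5 from rfl, show ((6:Int)).toNat = 6 from rfl, show ((7:Int)).toNat = 7 from rfl, show ((8:Int)).toNat = 8 from rfl, List.take_succ_cons, List.take,
        PySem.List.pyGetD, PySem.List.pyIdx?]
    all_goals
      refine ⟨fun h => absurd h (by omega), ?_, ?_, ?_, ?_, ?_, ?_, ?_⟩ <;>
        rw [if_pos (by omega)] <;>
        norm_num [PySem.List.pyGet?, PySem.List.pyIdx?] <;>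
        rw [if_pos (by omega)] <;>
        norm_num [show ((2:Int)).toNat = 2 from rfl, show ((3:Int)).toNat = 3 from rfl, show ((4:Int)).toNat = 4 from rfl, show ((5:Int)).toNat = 5 from rfl, show ((6:Int)).toNat = 6 from rfl, show ((7:Int)).toNat = 7 from rfl]

-- ===== VERDICT (by name: the statement is the Claim_ definition above) =====
set_option maxHeartbeats 1000000 in
theorem validate_weekly_frequency_py_spec : Claim_equal_validate_weekly_frequency_py := by
  intro plan target_frequency weekly_schedule _
  unfold Spec_validate_weekly_frequency_py validate_weekly_frequency_py validate_weekly_frequency_py_alt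
  rw [show PySem.List.pyRange 1 9 1 = [1, 2, 3, 4, 5, 6, 7, 8] from by decide,
    pv_buckets, pv_expecteds]
  simp only [List.foldl_cons, List.foldl_nil, List.zip, List.zipWith,
    PySem.List.enumerate_cons, PySem.List.enumerate_nil, List.filter_cons, List.filter_nil,
    decide_eq_true_eq,
    show ∀ i : Int, ((plan.filter (fun w => pvGetWeek w == some i)).length : Int) = pvCnt plan i
      from fun _ => rfl]
  generalize pvCnt plan 1 = c1
  generalize pvCnt plan 2 = c2
  generalize pvCnt plan 3 = c3
  generalize pvCnt plan 4 = c4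
  generalize pvCnt plan 5 = c5
  generalize pvCnt plan 6 = c6
  generalize pvCnt plan 7 = c7
  generalize pvCnt plan 8 = c8
  generalize pvExpected target_frequency weekly_schedule 1 = e1
  generalize pvExpected target_frequency weekly_schedule 2 = e2
  generalize pvExpected target_frequency weekly_schedule 3 = e3
  generalize pvExpected target_frequency weekly_schedule 4 = e4
  generalize pvExpected target_frequency weekly_schedule 5 = e5
  generalize pvExpected target_frequency weekly_schedule 6 = e6
  generalize pvExpected target_frequency weekly_schedule 7 = e7
  generalize pvExpected target_frequency weekly_schedule 8 = e8
  norm_num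
  rcases eq_or_ne c1 e1 with h1 | h1 <;>
    rcases eq_or_ne c2 e2 with h2 | h2 <;>
    rcases eq_or_ne c3 e3 with h3 | h3 <;>
    rcases eq_or_ne c4 e4 with h4 | h4 <;>
    rcases eq_or_ne c5 e5 with h5 | h5 <;>
    rcases eq_or_ne c6 e6 with h6 | h6 <;>
    rcases eq_or_ne c7 e7 with h7 | h7 <;>
    rcases eq_or_ne c8 e8 with h8 | h8 <;>
    simp [h1, h2, h3, h4, h5, h6, h7, h8]
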